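-- pv_equiv track=rewrite | github.com/Walter-Kovacs/ImportantInfoTelegramBot | functionalities/bonds/interface.py | _str_is_number
-- ===== SOURCE A (Python) =====
-- def _str_is_number(s: str) -> bool:
--     if len(s) == 0:
--         return False
--
--     fraction_point_counter = 0
--     for ch in s:
--         if ch not in '.0123456789':
--             return False
--         if ch == '.':
--             fraction_point_counter += 1
--
--     if fraction_point_counter in [0, 1]:
--         return True
--     else:
--         return False
-- ===== SOURCE B (Python) =====
-- def _str_is_number(s: str) -> bool:
--     if not s:
--         return False
--     parts = s.split('.')
--     if len(parts) > 2:
--         return False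
--     return all(all(ch in '0123456789' for ch in p) for p in parts)
-- ===== Notes on version B (the rewrite author's own statement) =====
-- stated objective: idiomatic
-- what changed: B splits the string at the decimal point into segments and checks that there are at most two segments, each consisting only of ASCII digits, instead of A's char-by-char scan with a dot counter and a final counter-membership test.
import Mathlib
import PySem

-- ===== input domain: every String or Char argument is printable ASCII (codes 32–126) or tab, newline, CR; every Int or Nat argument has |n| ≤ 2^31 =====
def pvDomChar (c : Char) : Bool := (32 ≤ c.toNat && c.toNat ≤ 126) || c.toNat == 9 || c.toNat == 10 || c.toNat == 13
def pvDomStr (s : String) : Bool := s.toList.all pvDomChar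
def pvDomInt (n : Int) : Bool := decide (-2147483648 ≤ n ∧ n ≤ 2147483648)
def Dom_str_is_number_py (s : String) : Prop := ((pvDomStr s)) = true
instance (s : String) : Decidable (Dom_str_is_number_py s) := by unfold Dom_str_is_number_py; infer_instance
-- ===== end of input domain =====

-- B replaces A's char-scan-with-dot-counter by an idiomatic split-on-'.' with at most two all-digit segments; return values proved equal on all inputs.


-- ===== PORT A =====
-- loop over the characters, carrying the fraction-point counter; early `return False` = result false
def strIsNumGo : List Char → Nat → Bool
  | [], cnt => [0, 1].contains cnt
  | ch :: rest, cnt =>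
    if !(".0123456789".toList.contains ch) then false
    else strIsNumGo rest (if ch == '.' then cnt + 1 else cnt)

def str_is_number_py (s : String) : Bool :=
  if s.toList.length = 0 then false
  else strIsNumGo s.toList 0

-- ===== PORT B =====
def str_is_number_py_alt (s : String) : Bool :=
  if s.toList = [] then false
  else
    let parts := PySem.Chars.splitOn s.toList ['.']
    if parts.length > 2 then false
    else parts.all (fun p => p.all (fun ch => "0123456789".toList.contains ch))

-- ===== PRECONDITION & SPEC =====
def Spec_str_is_number_py (s : String) (out : Bool) : Prop := out = str_is_number_py_alt s
instance (s : String) (out : Bool) : Decidable (Spec_str_is_number_py s out) := by unfold Spec_str_is_number_py; infer_instance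

-- ===== CLAIM (what is proved, stated in full; the proofs are below) =====
def Claim_equal_str_is_number_py : Prop := ∀ (s : String), Dom_str_is_number_py s → Spec_str_is_number_py s (str_is_number_py s)

-- ===== LEMMAS AND PROOFS =====

-- reference single-character split on '.'
def splitDot : List Char → List (List Char)
  | [] => [[]]
  | c :: r => if c = '.' then [] :: splitDot r else (splitDot r).modifyHead (c :: ·)

theorem splitDot_ne_nil (cs : List Char) : splitDot cs ≠ [] := by
  induction cs with
  | nil => simp [splitDot]
  | cons c r ih =>
    simp only [splitDot]
    split
    · simp
    · cases h : splitDot r with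
      | nil => exact absurd h ih
      | cons p ps => simp

theorem splitOn_go_eq (l : List Char) : ∀ (fuel : Nat) (cur : List Char)
    (acc : List (List Char)), l.length < fuel →
    PySem.Chars.splitOn.go ['.'] fuel l cur acc
      = acc.reverse ++ (splitDot l).modifyHead (cur.reverse ++ ·) := by
  induction l with
  | nil =>
    intro fuel cur acc h
    cases fuel with
    | zero => omega
    | succ n => simp [PySem.Chars.splitOn.go, splitDot]
  | cons c rest ih =>
    intro fuel cur acc h
    cases fuel with
    | zero => omega
    | succ n =>
      simp only [PySem.Chars.splitOn.go, List.isPrefixOf, Bool.and_true]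
      by_cases hc : c = '.'
      · subst hc
        simp only [beq_self_eq_true, if_pos, List.length_cons] at *
        simp only [List.length_nil, Nat.zero_add, List.drop_succ_cons, List.drop_zero]
        rw [ih n [] (cur.reverse :: acc) (by omega)]
        simp only [splitDot, if_pos rfl, List.reverse_nil, List.nil_append,
          List.reverse_cons, List.append_assoc, List.singleton_append]
        cases hsp : splitDot rest with
        | nil => exact absurd hsp (splitDot_ne_nil rest)
        | cons p ps => simp
      · have hbeq : ('.' == c) = false := by
          simp [beq_eq_false_iff_ne]; exact fun e => hc e.symm
        rw [if_neg (by simp [hbeq])]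
        rw [ih n (c :: cur) acc (by simpa using h)]
        simp only [splitDot, if_neg hc]
        cases hsp : splitDot rest with
        | nil => exact absurd hsp (splitDot_ne_nil rest)
        | cons p ps => simp

theorem splitOn_eq_splitDot (cs : List Char) :
    PySem.Chars.splitOn cs ['.'] = splitDot cs := by
  rw [PySem.Chars.splitOn, splitOn_go_eq cs (cs.length + 1) [] [] (by omega)]
  cases h : splitDot cs with
  | nil => exact absurd h (splitDot_ne_nil cs)
  | cons p ps => simp

theorem splitDot_length (cs : List Char) :
    (splitDot cs).length = cs.count '.' + 1 := by
  induction cs with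
  | nil => simp [splitDot]
  | cons c r ih =>
    simp only [splitDot, List.count_cons]
    by_cases hc : c = '.'
    · subst hc; simp [ih]
    · rw [if_neg hc]
      have : (c == '.') = false := by simpa [beq_eq_false_iff_ne] using hc
      simp [this, List.length_modifyHead, ih]

theorem splitDot_all_digits (cs : List Char) :
    (splitDot cs).all (fun p => p.all (fun ch => "0123456789".toList.contains ch))
      = cs.all (fun c => (c == '.') || "0123456789".toList.contains c) := by
  induction cs with
  | nil => simp [splitDot]
  | cons c r ih =>
    simp only [splitDot]
    by_cases hc : c = '.'
    · subst hc
      simp only [if_pos rfl, List.all_cons, List.all_nil, Bool.true_and, beq_self_eq_true,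
        Bool.true_or]
      exact ih
    · rw [if_neg hc]
      have hb : (c == '.') = false := by simpa [beq_eq_false_iff_ne] using hc
      cases hsp : splitDot r with
      | nil => exact absurd hsp (splitDot_ne_nil r)
      | cons p ps =>
        rw [hsp] at ih
        simp only [List.modifyHead_cons, List.all_cons, hb, Bool.false_or] at *
        rw [← ih]
        simp [Bool.and_assoc]

theorem strIsNumGo_eq (cs : List Char) : ∀ (cnt : Nat),
    strIsNumGo cs cnt
      = (cs.all (fun c => ".0123456789".toList.contains c)
          && decide (cnt + cs.count '.' ≤ 1)) := by
  induction cs with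
  | nil =>
    intro cnt
    simp only [strIsNumGo, List.all_nil, Bool.true_and, List.count_nil, Nat.add_zero]
    rcases cnt with _ | _ | n <;> simp [List.contains_cons]
  | cons c r ih =>
    intro cnt
    simp only [strIsNumGo, List.all_cons, List.count_cons]
    by_cases hm : (".0123456789".toList.contains c) = true
    · rw [if_neg (by rw [hm]; simp), hm, Bool.true_and, ih]

      by_cases hc : c = '.'
      · subst hc
        simp only [beq_self_eq_true, if_pos]
        congr 1
        simp; omega
      · have hb : (c == '.') = false := by simpa [beq_eq_false_iff_ne] using hc
        simp [hb]
    · rw [if_pos (by simp_all), Bool.eq_false_iff.mpr hm]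
      simp

theorem mem_full_split (c : Char) :
    (".0123456789".toList.contains c)
      = ((c == '.') || "0123456789".toList.contains c) := by
  have h : ".0123456789".toList = '.' :: "0123456789".toList := by decide
  rw [h, List.contains_cons]

-- ===== VERDICT (by name: the statement is the Claim_ definition above) =====
theorem str_is_number_py_spec : Claim_equal_str_is_number_py := by
  intro s _
  unfold Spec_str_is_number_py str_is_number_py str_is_number_py_alt
  by_cases hnil : s.toList = []
  · simp [hnil]
  · rw [if_neg (by simpa using (by simpa using hnil : s.toList.length ≠ 0)), if_neg hnil]
    rw [strIsNumGo_eq]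
    simp only [splitOn_eq_splitDot, splitDot_length, splitDot_all_digits]
    simp only [mem_full_split]
    by_cases hcnt : s.toList.count '.' ≤ 1
    · rw [if_neg (by omega)]
      simp [hcnt]
    · rw [if_pos (by omega)]
      simp [Nat.lt_of_not_le hcnt]
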